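-- pv_equiv track=rewrite | github.com/CharlesCNorton/AI-Bootstrap | refuted-unlikely-incomplete-mundane/Shifted-pythagorean/tests/test8b.py | find_solutions
-- ===== SOURCE A (Python) =====
-- from math import isqrt, sqrt
-- from typing import List, Tuple
--
-- def find_solutions(z: int) -> List[Tuple[int, int]]:
--     solutions = []
--     for x in range(2, z):
--         y_squared = z * z + 1 - x * x
--         if y_squared > 0:
--             y = isqrt(y_squared)
--             if y * y == y_squared and y > x:
--                 solutions.append((x, y))
--     return sorted(solutions)
--
-- z = 330182
--
-- solutions = find_solutions(z)
-- ===== SOURCE B (Python) =====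
-- from math import isqrt
-- from typing import List, Tuple
--
-- def find_solutions(z: int) -> List[Tuple[int, int]]:
--     n = z * z + 1
--     solutions = []
--     lo, hi = 2, isqrt(n)
--     while lo < hi:
--         s = lo * lo + hi * hi
--         if s < n:
--             lo += 1
--         elif s > n:
--             hi -= 1
--         else:
--             solutions.append((lo, hi))
--             lo += 1
--             hi -= 1
--     return solutions
-- ===== Notes on version B (the rewrite author's own statement) =====
-- stated objective: faster
-- what changed: replaced per-x perfect-square testing via isqrt inside the loop (plus a final sort) by a converging two-pointer scan lo/hi over lo*lo+hi*hi vs z*z+1, with one isqrt up front and no sort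
-- outside the precondition, e.g. on find_solutions(-8): A returns [], B returns [(4, 7)]
import Mathlib
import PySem

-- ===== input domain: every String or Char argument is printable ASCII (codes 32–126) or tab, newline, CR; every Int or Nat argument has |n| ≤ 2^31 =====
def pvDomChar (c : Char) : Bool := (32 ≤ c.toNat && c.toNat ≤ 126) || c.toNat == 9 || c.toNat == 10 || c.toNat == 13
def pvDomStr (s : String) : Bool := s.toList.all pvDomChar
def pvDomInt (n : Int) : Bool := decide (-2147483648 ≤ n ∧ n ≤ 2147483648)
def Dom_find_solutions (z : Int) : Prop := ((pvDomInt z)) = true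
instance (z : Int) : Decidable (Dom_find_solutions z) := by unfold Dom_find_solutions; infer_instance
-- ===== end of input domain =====

-- B replaces A's per-x perfect-square test (isqrt in every iteration, then a sort) by a
-- converging two-pointer scan with a single isqrt up front and no sort.

-- math.isqrt, exact on nonnegative ints (both ports only apply it to positive arguments)
def pyIsqrt (n : Int) : Int := (Nat.sqrt n.toNat : Int)

-- ===== PORT A =====
def find_solutions (z : Int) : List (Int × Int) :=
  let solutions := (PySem.List.pyRange 2 z 1).foldl (fun acc x =>
    let y_squared := z * z + 1 - x * x
    if 0 < y_squared then
      let y := pyIsqrt y_squared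
      if y * y = y_squared ∧ x < y then acc ++ [(x, y)] else acc
    else acc) ([] : List (Int × Int))
  PySem.List.sorted2 solutions Prod.fst Prod.snd false

-- ===== PORT B =====
def tpLoop (n lo hi : Int) : List (Int × Int) :=
  if _h : lo < hi then
    if lo * lo + hi * hi < n then tpLoop n (lo + 1) hi
    else if n < lo * lo + hi * hi then tpLoop n lo (hi - 1)
    else (lo, hi) :: tpLoop n (lo + 1) (hi - 1)
  else []
termination_by (hi - lo).toNat
decreasing_by all_goals omega

def find_solutions_alt (z : Int) : List (Int × Int) :=
  let n := z * z + 1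
  tpLoop n 2 (pyIsqrt n)

-- ===== PRECONDITION & SPEC =====
-- Pre_ excludes negative z, on which A's empty result is an artefact of range(2, z) being
-- empty while B's scan of z*z+1 is sign-independent: both values are defensible on that
-- unspecified corner, so it lies outside the claim.
def Pre_find_solutions (z : Int) : Prop := 0 ≤ z
instance (z : Int) : Decidable (Pre_find_solutions z) := by unfold Pre_find_solutions; infer_instance
def pvWitness_find_solutions : Int := 38

def Spec_find_solutions (z : Int) (out : List (Int × Int)) : Prop := out = find_solutions_alt z
instance (z : Int) (out : List (Int × Int)) : Decidable (Spec_find_solutions z out) := by unfold Spec_find_solutions; infer_instance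

-- ===== CLAIM (what is proved, stated in full; the proofs are below) =====
def Claim_equal_find_solutions : Prop := ∀ (z : Int), Dom_find_solutions z → Pre_find_solutions z → Spec_find_solutions z (find_solutions z)

-- ===== LEMMAS AND PROOFS =====

-- the per-x test both characterisations share: is (x, √(n-x²)) a solution with x < y ≤ hi?
def solsF (n hi x : Int) : Option (Int × Int) :=
  if pyIsqrt (n - x * x) * pyIsqrt (n - x * x) = n - x * x ∧ x < pyIsqrt (n - x * x) ∧
      pyIsqrt (n - x * x) ≤ hi then some (x, pyIsqrt (n - x * x)) else none

-- the common value: all (x, y) with lo ≤ x < y ≤ hi and x² + y² = n, ascending in x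
def solsAux (n lo hi : Int) : List (Int × Int) :=
  (PySem.List.pyRange lo hi 1).filterMap (solsF n hi)

lemma pyIsqrt_sq (y : Int) (hy : 0 ≤ y) : pyIsqrt (y * y) = y := by
  unfold pyIsqrt
  have h : (y * y).toNat = y.toNat ^ 2 := by
    have := Int.toNat_of_nonneg hy; nlinarith [Int.toNat_of_nonneg (mul_nonneg hy hy)]
  rw [h, Nat.sqrt_eq']
  omega

lemma sq_le_sq_int {a b : Int} (h0 : 0 ≤ a) (h : a ≤ b) : a * a ≤ b * b := by nlinarith

lemma sq_eq_sq_int {a b : Int} (h0 : 0 ≤ a) (hab : a ≤ b) (h : a * a = b * b) : a = b := by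
  rcases eq_or_lt_of_le hab with heq | hlt
  · exact heq
  · exact absurd (mul_self_lt_mul_self h0 hlt) (by omega)

-- changing the y-bound from hi to hi - 1 does not change solsF for x when no partner y = hi exists
lemma solsF_shrink (n hi x : Int) (hnohi : pyIsqrt (n - x * x) = hi →
    pyIsqrt (n - x * x) * pyIsqrt (n - x * x) ≠ n - x * x) :
    solsF n (hi - 1) x = solsF n hi x := by
  unfold solsF
  split_ifs with h1 h2 h2
  · rfl
  · exact absurd ⟨h1.1, h1.2.1, by omega⟩ h2
  · exfalso
    apply h1
    refine ⟨h2.1, h2.2.1, ?_⟩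
    by_contra hgt
    have hyhi : pyIsqrt (n - x * x) = hi := by omega
    exact hnohi hyhi h2.1
  · rfl

-- B's loop computes solsAux
lemma tpLoop_eq_solsAux (n lo hi : Int) (hlo : 2 ≤ lo) : tpLoop n lo hi = solsAux n lo hi := by
  have main : ∀ (k : Nat) (lo hi : Int), (hi - lo).toNat = k → 2 ≤ lo →
      tpLoop n lo hi = solsAux n lo hi := by
    intro k
    induction k using Nat.strong_induction_on with
    | _ k ih =>
      intro lo hi hk hlo
      rw [tpLoop]
      by_cases h : lo < hi
      · simp only [dif_pos h]
        by_cases hs1 : lo * lo + hi * hi < n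
        · rw [if_pos hs1, ih (hi - (lo + 1)).toNat (by omega) (lo + 1) hi rfl (by omega)]
          unfold solsAux
          rw [PySem.List.pyRange_one_cons h, List.filterMap_cons]
          have hnone : solsF n hi lo = none := by
            unfold solsF
            rw [if_neg]
            rintro ⟨h1, h2, h3⟩
            have hsq : pyIsqrt (n - lo * lo) * pyIsqrt (n - lo * lo) ≤ hi * hi :=
              sq_le_sq_int (by omega) h3
            linarith
          rw [hnone]
        · rw [if_neg hs1]
          by_cases hs2 : n < lo * lo + hi * hi
          · rw [if_pos hs2, ih (hi - 1 - lo).toNat (by omega) lo (hi - 1) rfl hlo]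
            unfold solsAux
            have hsplit : PySem.List.pyRange lo hi 1 =
                PySem.List.pyRange lo (hi - 1) 1 ++ [hi - 1] := by
              have := PySem.List.pyRange_one_succ_right (a := lo) (b := hi - 1) (by omega)
              simpa using this
            rw [hsplit, List.filterMap_append]
            have hlast : List.filterMap (solsF n hi) [hi - 1] = [] := by
              simp only [List.filterMap_cons, List.filterMap_nil]
              unfold solsF
              rw [if_neg]
              rintro ⟨h1, h2, h3⟩
              have hyhi : pyIsqrt (n - (hi - 1) * (hi - 1)) = hi := by omega
              rw [hyhi] at h1
              have hsq : lo * lo ≤ (hi - 1) * (hi - 1) := sq_le_sq_int (by omega) (by omega)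
              linarith
            rw [hlast, List.append_nil]
            apply List.filterMap_congr
            intro x hx
            rw [PySem.List.mem_pyRange_one] at hx
            apply solsF_shrink
            intro hyhi h1
            rw [hyhi] at h1
            have hsq : lo * lo ≤ x * x := sq_le_sq_int (by omega) (by omega)
            linarith
          · rw [if_neg hs2, ih (hi - 1 - (lo + 1)).toNat (by omega) (lo + 1) (hi - 1) rfl (by omega)]
            have hsn : lo * lo + hi * hi = n := by omega
            unfold solsAux
            rw [PySem.List.pyRange_one_cons h, List.filterMap_cons]
            have hhead : solsF n hi lo = some (lo, hi) := by
              unfold solsF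
              have hn : n - lo * lo = hi * hi := by linarith
              rw [hn, pyIsqrt_sq hi (by omega)]
              rw [if_pos ⟨rfl, h, le_refl hi⟩]
            rw [hhead]
            congr 1
            by_cases hd : lo + 1 < hi
            · have hsplit : PySem.List.pyRange (lo + 1) hi 1 =
                  PySem.List.pyRange (lo + 1) (hi - 1) 1 ++ [hi - 1] := by
                have := PySem.List.pyRange_one_succ_right (a := lo + 1) (b := hi - 1) (by omega)
                simpa using this
              rw [hsplit, List.filterMap_append]
              have hlast : List.filterMap (solsF n hi) [hi - 1] = [] := by
                simp only [List.filterMap_cons, List.filterMap_nil]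
                unfold solsF
                rw [if_neg]
                rintro ⟨h1, h2, h3⟩
                have hyhi : pyIsqrt (n - (hi - 1) * (hi - 1)) = hi := by omega
                rw [hyhi] at h1
                have hx2 : (hi - 1) * (hi - 1) = lo * lo := by linarith
                have : lo = hi - 1 := sq_eq_sq_int (by omega) (by omega) hx2.symm
                omega
              rw [hlast, List.append_nil]
              apply List.filterMap_congr
              intro x hx
              rw [PySem.List.mem_pyRange_one] at hx
              apply solsF_shrink
              intro hyhi h1
              rw [hyhi] at h1
              have hx2 : lo * lo = x * x := by linarith
              have : lo = x := sq_eq_sq_int (by omega) (by omega) hx2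
              omega
            · have h1 : PySem.List.pyRange (lo + 1) hi 1 = [] :=
                PySem.List.pyRange_one_eq_nil (by omega)
              have h2 : PySem.List.pyRange (lo + 1) (hi - 1) 1 = [] :=
                PySem.List.pyRange_one_eq_nil (by omega)
              rw [h1, h2]
              simp
      · simp only [dif_neg h]
        unfold solsAux
        rw [PySem.List.pyRange_one_eq_nil (by omega), List.filterMap_nil]
  exact main (hi - lo).toNat lo hi rfl hlo

-- filter-then-map is filterMap (the specific shape of A's accumulated list)
lemma map_filter_eq_filterMap {α β : Type} (p : α → Bool) (f : α → β) (l : List α) :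
    (l.filter p).map f = l.filterMap (fun x => if p x then some (f x) else none) := by
  induction l with
  | nil => rfl
  | cons a t ihl =>
    by_cases hp : p a
    · simp [hp, ihl]
    · simp [hp, ihl]

-- A's loop computes solsAux (z² + 1) 2 z (every z)
lemma foldlA_eq_solsAux (z : Int) :
    (PySem.List.pyRange 2 z 1).foldl (fun acc x =>
      let y_squared := z * z + 1 - x * x
      if 0 < y_squared then
        let y := pyIsqrt y_squared
        if y * y = y_squared ∧ x < y then acc ++ [(x, y)] else acc
      else acc) ([] : List (Int × Int)) = solsAux (z * z + 1) 2 z := by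
  have hfun : (fun (acc : List (Int × Int)) (x : Int) =>
      let y_squared := z * z + 1 - x * x
      if 0 < y_squared then
        let y := pyIsqrt y_squared
        if y * y = y_squared ∧ x < y then acc ++ [(x, y)] else acc
      else acc) = (fun acc x =>
      if (decide (0 < z * z + 1 - x * x ∧
            pyIsqrt (z * z + 1 - x * x) * pyIsqrt (z * z + 1 - x * x) = z * z + 1 - x * x ∧
            x < pyIsqrt (z * z + 1 - x * x))) = true
      then acc ++ [(x, pyIsqrt (z * z + 1 - x * x))] else acc) := by
    funext acc x
    simp only [decide_eq_true_eq]
    by_cases h1 : 0 < z * z + 1 - x * x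
    · by_cases h2 : pyIsqrt (z * z + 1 - x * x) * pyIsqrt (z * z + 1 - x * x) =
          z * z + 1 - x * x ∧ x < pyIsqrt (z * z + 1 - x * x)
      · rw [if_pos h1, if_pos h2, if_pos ⟨h1, h2.1, h2.2⟩]
      · rw [if_pos h1, if_neg h2, if_neg (by tauto)]
    · rw [if_neg h1, if_neg (by tauto)]
  rw [hfun, PySem.List.foldl_append_if, List.nil_append, map_filter_eq_filterMap]
  apply List.filterMap_congr
  intro x hx
  rw [PySem.List.mem_pyRange_one] at hx
  unfold solsF
  simp only [decide_eq_true_eq]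
  split_ifs with h1 h2 h2
  · rfl
  · -- A's test holds, so y > x ≥ 2 and y² = z²+1-x² with x < z forces y ≤ z
    exfalso
    apply h2
    refine ⟨h1.2.1, h1.2.2, ?_⟩
    by_contra hgt
    have hzy : z * z < pyIsqrt (z * z + 1 - x * x) * pyIsqrt (z * z + 1 - x * x) :=
      mul_self_lt_mul_self (by omega) (by omega)
    have hx4 : 2 * 2 ≤ x * x := sq_le_sq_int (by omega) (by omega)
    linarith [h1.2.1]
  · -- solsF's test holds, so y² = z²+1-x² > 0 and A's test holds
    exfalso
    apply h1
    refine ⟨?_, h2.1, h2.2.1⟩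
    have hpos : 0 < pyIsqrt (z * z + 1 - x * x) * pyIsqrt (z * z + 1 - x * x) :=
      mul_pos (by omega) (by omega)
    linarith [h2.1]
  · rfl

lemma solsAux_pairwise (n lo hi : Int) :
    (solsAux n lo hi).Pairwise (fun a b => a.1 < b.1) := by
  unfold solsAux
  rw [List.pairwise_filterMap]
  apply (PySem.List.pairwise_lt_pyRange_one lo hi).imp
  intro a b hab p hp q hq
  unfold solsF at hp hq
  split_ifs at hp hq
  · simp only [Option.some.injEq] at hp hq
    subst hp
    subst hq
    simpa using hab

-- sorted( ) of a list already strictly increasing in its first component is itself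
lemma sorted2_eq_self_of_pairwise_fst_lt (xs : List (Int × Int))
    (h : xs.Pairwise (fun a b => a.1 < b.1)) :
    PySem.List.sorted2 xs Prod.fst Prod.snd false = xs := by
  induction xs using List.reverseRecOn with
  | nil => rfl
  | append_singleton t x ih =>
    rw [List.pairwise_append] at h
    have ht := ih h.1
    simp only [PySem.List.sorted2, Bool.false_eq_true, if_false, List.foldl_append,
      List.foldl_cons, List.foldl_nil] at ht ⊢
    rw [ht]
    apply PySem.List.insertBy_of_forall_not_before
    intro y hy
    have hlt : y.1 < x.1 := h.2.2 y hy x (List.mem_singleton_self x)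
    simp [show ¬(x.1 < y.1) by omega, hlt]

lemma isqrt_zsq_add_one (z : Int) (hz : 2 ≤ z) : pyIsqrt (z * z + 1) = z := by
  unfold pyIsqrt
  have h1 : (z * z + 1).toNat = z.toNat * z.toNat + 1 := by
    have := Int.toNat_of_nonneg (by omega : (0 : Int) ≤ z)
    nlinarith [Int.toNat_of_nonneg (by nlinarith : (0 : Int) ≤ z * z + 1)]
  rw [h1]
  have hle : z.toNat ≤ Nat.sqrt (z.toNat * z.toNat + 1) := Nat.le_sqrt.mpr (by omega)
  have hlt : Nat.sqrt (z.toNat * z.toNat + 1) < z.toNat + 1 :=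
    Nat.sqrt_lt.mpr (by nlinarith [show 2 ≤ z.toNat by omega])
  omega

-- ===== VERDICT (by name: the statement is the Claim_ definition above) =====
theorem find_solutions_spec : Claim_equal_find_solutions := by
  intro z _ hpre
  unfold Spec_find_solutions find_solutions find_solutions_alt
  simp only []
  rw [foldlA_eq_solsAux z,
      sorted2_eq_self_of_pairwise_fst_lt _ (solsAux_pairwise _ _ _),
      tpLoop_eq_solsAux _ _ _ (by omega)]
  by_cases hz : 2 ≤ z
  · rw [isqrt_zsq_add_one z hz]
  · have hz01 : 0 ≤ z ∧ z < 2 := by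
      unfold Pre_find_solutions at hpre; omega
    have hpi : pyIsqrt (z * z + 1) ≤ 1 := by
      have h0 : z = 0 ∨ z = 1 := by omega
      rcases h0 with rfl | rfl
      · unfold pyIsqrt
        norm_num
      · unfold pyIsqrt
        have hlt : Nat.sqrt ((1 * 1 + 1 : Int)).toNat < 2 := Nat.sqrt_lt.mpr (by norm_num)
        omega
    unfold solsAux
    rw [PySem.List.pyRange_one_eq_nil (by omega), PySem.List.pyRange_one_eq_nil (by omega)]
    simp
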